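-- pv_equiv track=rewrite | github.com/augusto-marques-anacleto/clientMud | core/importer.py | limpar_url
-- ===== SOURCE A (Python) =====
-- def limpar_url(texto):
--     inicio = texto.find('http')
--     if inicio == -1:
--         return texto.strip()
--
--     texto = texto[inicio:]
--     url_limpa = ""
--
--     for char in texto:
--         if char in (' ', '<', '>', '"', "'"):
--             break
--         if char not in ('\n', '\r', '\t'):
--             url_limpa += char
--
--     return url_limpa
-- ===== SOURCE B (Python) =====
-- def limpar_url(texto):
--     inicio = texto.find('http')
--     if inicio == -1:
--         return texto.strip()
--     resto = texto[inicio:]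
--     for d in ' <>"\'':
--         resto = resto.split(d, 1)[0]
--     return resto.translate({9: None, 10: None, 13: None})
-- ===== Notes on version B (the rewrite author's own statement) =====
-- stated objective: alternative
-- what changed: A scans once, deciding break/skip per character into an accumulator; B never scans for delimiters itself: it successively truncates the slice with split(d, 1)[0] once per each of the five delimiters, then deletes tab/LF/CR in a final str.translate pass.
import Mathlib
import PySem

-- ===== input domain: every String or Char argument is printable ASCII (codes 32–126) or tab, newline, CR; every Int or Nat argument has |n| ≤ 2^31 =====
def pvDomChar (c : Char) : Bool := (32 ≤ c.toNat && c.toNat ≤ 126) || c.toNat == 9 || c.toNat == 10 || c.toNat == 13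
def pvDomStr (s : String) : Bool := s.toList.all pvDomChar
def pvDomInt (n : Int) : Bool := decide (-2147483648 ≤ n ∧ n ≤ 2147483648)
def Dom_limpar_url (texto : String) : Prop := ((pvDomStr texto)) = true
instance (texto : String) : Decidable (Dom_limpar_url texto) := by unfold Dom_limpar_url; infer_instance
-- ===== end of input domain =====

-- B replaces A's per-character break/skip scan by five split(d,1)[0] truncations plus a translate deletion pass; same cost, different algorithm.

-- ===== PORT A =====
-- A's for-loop with break: structural recursion over the characters, accumulating url_limpa.
def limparLoopA : List Char → String → String
  | [], acc => acc
  | c :: cs, acc =>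
    if c = ' ' ∨ c = '<' ∨ c = '>' ∨ c = '"' ∨ c = '\'' then acc
    else if c = '\n' ∨ c = '\r' ∨ c = '\t' then limparLoopA cs acc
    else limparLoopA cs (acc.push c)

def limpar_url (texto : String) : String :=
  let inicio := PySem.Str.find texto "http"
  if inicio = -1 then PySem.Str.strip texto
  else limparLoopA (PySem.Str.slice texto (some inicio) none).toList ""

-- ===== PORT B =====
def limparDelims : List Char := [' ', '<', '>', '"', '\'']

def limpar_url_alt (texto : String) : String :=
  let inicio := PySem.Str.find texto "http"
  if inicio = -1 then PySem.Str.strip texto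
  else
    let resto := (PySem.Str.slice texto (some inicio) none).toList
    -- for d in ' <>"\'': resto = resto.split(d, 1)[0] — ported by hand: r.split(d, 1)[0] is
    -- exactly the prefix of r before the first occurrence of d (all of r if d absent); exact
    let resto := limparDelims.foldl (fun r d => r.takeWhile (fun c => !(c == d))) resto
    -- resto.translate({9: None, 10: None, 13: None}): deletes exactly tab/LF/CR — ported by hand as a character filter (exact)
    String.ofList (resto.filter (fun c => !(c == '\t' || c == '\n' || c == '\r')))

-- ===== PRECONDITION & SPEC =====
def Spec_limpar_url (texto : String) (out : String) : Prop := out = limpar_url_alt texto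
instance (texto : String) (out : String) : Decidable (Spec_limpar_url texto out) := by unfold Spec_limpar_url; infer_instance

-- ===== CLAIM =====
def Claim_equal_limpar_url : Prop := ∀ (texto : String), Dom_limpar_url texto → Spec_limpar_url texto (limpar_url texto)

-- ===== LEMMAS AND PROOFS =====
def limparIsDelim (c : Char) : Bool := c == ' ' || c == '<' || c == '>' || c == '"' || c == '\''
def limparIsWs (c : Char) : Bool := c == '\t' || c == '\n' || c == '\r'

theorem trunc_eq (r : List Char) :
    limparDelims.foldl (fun r d => r.takeWhile (fun c => !(c == d))) r
      = r.takeWhile (fun c => !limparIsDelim c) := by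
  simp only [limparDelims, List.foldl, List.takeWhile_takeWhile]
  congr 1
  funext c
  by_cases h1 : c = ' ' <;> by_cases h2 : c = '<' <;> by_cases h3 : c = '>' <;>
    by_cases h4 : c = '"' <;> by_cases h5 : c = '\'' <;> simp [limparIsDelim, h1, h2, h3, h4, h5]

theorem limparLoop_toList (cs : List Char) : ∀ (acc : String),
    (limparLoopA cs acc).toList
      = acc.toList ++ (cs.takeWhile (fun c => !limparIsDelim c)).filter (fun c => !limparIsWs c) := by
  induction cs with
  | nil => intro acc; simp [limparLoopA]
  | cons c cs ih =>
    intro acc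
    by_cases hd : c = ' ' ∨ c = '<' ∨ c = '>' ∨ c = '"' ∨ c = '\''
    · have hd' : limparIsDelim c = true := by simp [limparIsDelim]; tauto
      simp [limparLoopA, hd, hd']
    · have hd' : limparIsDelim c = false := by simp [limparIsDelim]; tauto
      by_cases hw : c = '\n' ∨ c = '\r' ∨ c = '\t'
      · have hw' : limparIsWs c = true := by simp [limparIsWs]; tauto
        simp [limparLoopA, hd, hw, hd', ih, hw']
      · have hw' : limparIsWs c = false := by simp [limparIsWs]; tauto
        simp [limparLoopA, hd, hw, hd', ih, hw']

-- ===== VERDICT =====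
theorem limpar_url_spec : Claim_equal_limpar_url := by
  intro texto _
  show limpar_url texto = limpar_url_alt texto
  rw [← String.toList_inj]
  by_cases h : PySem.Chars.find texto.toList ['h', 't', 't', 'p'] = -1 <;>
    simp [limpar_url, limpar_url_alt, h, limparLoop_toList, trunc_eq, String.toList_ofList, limparIsWs]
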